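-- pv_equiv track=rewrite | github.com/dmh03/Lexical_stress_predictor | api4-syllable-average/app.py | _syllabify
-- ===== SOURCE A (Python) =====
-- _VOWEL_BASES = {
--     "AA", "AE", "AH", "AO", "AW", "AY",
--     "EH", "ER", "EY",
--     "IH", "IY",
--     "OW", "OY",
--     "UH", "UW",
-- }
--
-- def _is_vowel(phone: str) -> bool:
--     """Return True if *phone* (with or without stress digit) is a vowel."""
--     return phone.rstrip("012") in _VOWEL_BASES
--
-- def _syllabify(phones: list[str]) -> list[list[str]]:
--     """
--     Split a flat ARPABET phone list into syllables using an onset-based rule: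
--     each syllable begins on the consonants immediately before its vowel nucleus.
--
--     Example:  ['B', 'IY2', 'AO1', 'N', 'D']  →  [['B','IY2'], ['AO1','N','D']]
--     """
--     syllables: list[list[str]] = []
--     current:   list[str]       = []
--
--     for ph in phones:
--         if _is_vowel(ph):
--             # Pull trailing consonants from the previous syllable into the onset
--             onset: list[str] = []
--             while current and not _is_vowel(current[-1]):
--                 onset.insert(0, current.pop())
--             if current:
--                 syllables.append(current)
--             current = onset + [ph]
--         else:
--             current.append(ph)
--
--     if current:
--         syllables.append(current)
--
--     return syllables if syllables else [phones]
-- ===== SOURCE B (Python) =====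
-- _VOWEL_BASES = {
--     "AA", "AE", "AH", "AO", "AW", "AY",
--     "EH", "ER", "EY",
--     "IH", "IY",
--     "OW", "OY",
--     "UH", "UW",
-- }
--
-- def _is_vowel(phone: str) -> bool:
--     """Return True if *phone* (with or without stress digit) is a vowel."""
--     return phone.rstrip("012") in _VOWEL_BASES
--
-- def _syllabify(phones: list[str]) -> list[list[str]]:
--     """
--     Top-down slicing: repeatedly cut the input at the first vowel nucleus.
--     Each iteration finds the first vowel of the remaining suffix; if more
--     vowels follow, everything up to and including that vowel is one syllable
--     and the walk continues on the rest; otherwise the whole remaining suffix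
--     (last nucleus plus coda, or an all-consonant / empty input) is the final
--     syllable.  No stack popping, no per-phone state machine.
--     """
--     out: list[list[str]] = []
--     rest = list(phones)
--     while True:
--         j = next((k for k, ph in enumerate(rest) if _is_vowel(ph)), None)
--         if j is None or not any(_is_vowel(p) for p in rest[j + 1:]):
--             out.append(rest)
--             return out
--         out.append(rest[:j + 1])
--         rest = rest[j + 1:]
-- ===== Notes on version B (the rewrite author's own statement) =====
-- stated objective: alternative
-- what changed: Replaces A's per-phone stack machine (append each phone, then pop/insert trailing consonants back into an onset whenever a vowel arrives) with a top-down slicing loop that repeatedly cuts the remaining suffix just after its first vowel, so syllables are emitted as slices and no popping or per-phone state is kept.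
import Mathlib
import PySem

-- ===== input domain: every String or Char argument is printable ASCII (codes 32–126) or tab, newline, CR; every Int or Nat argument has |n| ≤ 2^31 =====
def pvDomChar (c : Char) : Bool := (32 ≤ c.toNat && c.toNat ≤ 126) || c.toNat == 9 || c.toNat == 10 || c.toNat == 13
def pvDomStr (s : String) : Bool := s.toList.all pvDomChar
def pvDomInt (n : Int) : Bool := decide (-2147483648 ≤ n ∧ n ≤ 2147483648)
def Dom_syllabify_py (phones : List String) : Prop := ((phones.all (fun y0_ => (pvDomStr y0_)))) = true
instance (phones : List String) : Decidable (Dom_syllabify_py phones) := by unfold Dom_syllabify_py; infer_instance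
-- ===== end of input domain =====

-- B replaces A's per-phone stack machine (pop/insert onset pulling) by top-down slicing at each
-- first vowel of the remaining suffix (objective: alternative decomposition, same exact values).

-- ===== shared module helper `_is_vowel` (used by both Pythons) =====
-- _VOWEL_BASES
def vowelBases : List String :=
  ["AA", "AE", "AH", "AO", "AW", "AY", "EH", "ER", "EY", "IH", "IY", "OW", "OY", "UH", "UW"]

-- phone.rstrip("012"): hand port (PySem has no rstrip-with-chars); removes the maximal suffix of
-- '0'/'1'/'2' characters — exact for every string.
def rstrip012 (cs : List Char) : List Char :=
  (cs.reverse.dropWhile (fun c => c == '0' || c == '1' || c == '2')).reverse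

-- `phone.rstrip("012") in _VOWEL_BASES` (set membership: order-independent, List.contains is exact)
def isVowel (ph : String) : Bool := vowelBases.contains (String.ofList (rstrip012 ph.toList))

-- ===== PORT A =====
-- the while loop `while current and not _is_vowel(current[-1]): onset.insert(0, current.pop())`,
-- run on current.reverse (pop = head of the reversed list); returns (reversed remaining current, onset)
def popLoop : List String → List String → List String × List String
  | [], onset => ([], onset)
  | x :: rev, onset => if isVowel x then (x :: rev, onset) else popLoop rev (x :: onset)

-- one iteration of A's `for ph in phones` body on the state (syllables, current)
def stepA (st : List (List String) × List String) (ph : String) : List (List String) × List String :=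
  if isVowel ph then
    let pr := popLoop st.2.reverse []
    let current := pr.1.reverse
    let syllables := if current = [] then st.1 else st.1 ++ [current]
    (syllables, pr.2 ++ [ph])
  else (st.1, st.2 ++ [ph])

def syllabify_py (phones : List String) : List (List String) :=
  let st := phones.foldl stepA ([], [])
  let syllables := if st.2 = [] then st.1 else st.1 ++ [st.2]
  if syllables = [] then [phones] else syllables

-- ===== PORT B =====
-- next((k for k, ph in enumerate(rest) if _is_vowel(ph)), None)
def firstVowelIdx : List String → Nat → Option Nat
  | [], _ => none
  | ph :: rest, k => if isVowel ph then some k else firstVowelIdx rest (k + 1)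

-- any(_is_vowel(p) for p in l)
def anyVowel (l : List String) : Bool := l.any isVowel

-- the `while True` loop of Source B on the state (out, rest)
def splitLoop (out : List (List String)) (rest : List String) : List (List String) :=
  match h : firstVowelIdx rest 0 with
  | none => out ++ [rest]
  | some j =>
    if anyVowel (PySem.List.slice rest (some ((j : Int) + 1)) none) then
      splitLoop (out ++ [PySem.List.slice rest none (some ((j : Int) + 1))])
        (PySem.List.slice rest (some ((j : Int) + 1)) none)
    else out ++ [rest]
termination_by rest.length
decreasing_by
  have hne : rest ≠ [] := by intro hrest; rw [hrest] at h; simp [firstVowelIdx] at h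
  have : ((j : Int) + 1) = ((j + 1 : Nat) : Int) := by push_cast; ring
  rw [this, PySem.List.slice_from_natCast]
  have hlen : 0 < rest.length := List.length_pos_iff.mpr hne
  simp [List.length_drop]; omega

def syllabify_py_alt (phones : List String) : List (List String) := splitLoop [] phones

-- ===== PRECONDITION & SPEC =====
def Spec_syllabify_py (phones : List String) (out : List (List String)) : Prop := out = syllabify_py_alt phones
instance (phones : List String) (out : List (List String)) : Decidable (Spec_syllabify_py phones out) := by unfold Spec_syllabify_py; infer_instance

-- ===== CLAIM (what is proved, stated in full; the proofs are below) =====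
def Claim_equal_syllabify_py : Prop := ∀ (phones : List String), Dom_syllabify_py phones → Spec_syllabify_py phones (syllabify_py phones)

-- ===== LEMMAS AND PROOFS =====

-- nucleus shape invariant for A's `current = nucleus ++ coda` decomposition
def NucOK (nuc : List String) : Prop := nuc = [] ∨ ∃ a v, nuc = a ++ [v] ∧ isVowel v = true

-- elementwise reference machine: state (emitted syllables, nucleus part, consonant coda)
def espec : List (List String) → List String → List String → List String → List (List String)
  | syl, nuc, coda, [] => if nuc ++ coda = [] then syl else syl ++ [nuc ++ coda]
  | syl, nuc, coda, ph :: p =>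
    if isVowel ph then espec (if nuc = [] then syl else syl ++ [nuc]) (coda ++ [ph]) [] p
    else espec syl nuc (coda ++ [ph]) p

theorem popLoop_run (brev : List String) : ∀ (r onset : List String),
    (∀ x ∈ brev, isVowel x = false) →
    popLoop (brev ++ r) onset = popLoop r (brev.reverse ++ onset) := by
  induction brev with
  | nil => intro r onset _; simp
  | cons x br ih =>
    intro r onset hall
    have hx : isVowel x = false := hall x (by simp)
    simp only [List.cons_append, popLoop, hx, if_neg Bool.false_ne_true, ih r (x :: onset)
      (fun y hy => hall y (by simp [hy])), List.reverse_cons, List.append_assoc, List.cons_append,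
      List.nil_append]

theorem popLoop_spec (nuc coda : List String) (hn : NucOK nuc)
    (hc : ∀ x ∈ coda, isVowel x = false) :
    popLoop (nuc ++ coda).reverse [] = (nuc.reverse, coda) := by
  have h1 : (nuc ++ coda).reverse = coda.reverse ++ nuc.reverse := by simp
  rw [h1, popLoop_run coda.reverse nuc.reverse [] (by simpa using hc)]
  simp only [List.reverse_reverse, List.append_nil]
  rcases hn with h | ⟨a, v, rfl, hv⟩
  · subst h; cases coda <;> simp [popLoop]
  · simp [popLoop, hv]

theorem foldA (p : List String) : ∀ (syl : List (List String)) (nuc coda : List String),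
    NucOK nuc → (∀ x ∈ coda, isVowel x = false) →
    (let st := p.foldl stepA (syl, nuc ++ coda);
      if st.2 = [] then st.1 else st.1 ++ [st.2]) = espec syl nuc coda p := by
  induction p with
  | nil =>
    intro syl nuc coda _ _
    rfl
  | cons ph p ih =>
    intro syl nuc coda hn hc
    simp only [List.foldl_cons, espec]
    by_cases hv : isVowel ph
    · have hstep : stepA (syl, nuc ++ coda) ph
          = ((if nuc = [] then syl else syl ++ [nuc]), coda ++ [ph]) := by
        simp only [stepA, hv, if_true, popLoop_spec nuc coda hn hc, List.reverse_reverse]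
      rw [hstep]
      have := ih (if nuc = [] then syl else syl ++ [nuc]) (coda ++ [ph]) []
        (Or.inr ⟨coda, ph, rfl, hv⟩) (by simp)
      simp only [List.append_nil] at this
      rw [if_pos hv]
      exact this
    · have hv' : isVowel ph = false := by simpa using hv
      have hstep : stepA (syl, nuc ++ coda) ph = (syl, nuc ++ (coda ++ [ph])) := by
        simp [stepA, hv']
      rw [hstep]
      simp only [hv', Bool.false_eq_true, if_false]
      exact ih syl nuc (coda ++ [ph]) hn
        (by intro x hx; rcases List.mem_append.mp hx with h | h
            · exact hc x h
            · simp at h; subst h; exact hv')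

theorem espec_run (c : List String) : ∀ (syl : List (List String)) (nuc coda r : List String),
    (∀ x ∈ c, isVowel x = false) →
    espec syl nuc coda (c ++ r) = espec syl nuc (coda ++ c) r := by
  induction c with
  | nil => intro syl nuc coda r _; simp
  | cons x cs ih =>
    intro syl nuc coda r hall
    have hx : isVowel x = false := hall x (by simp)
    simp only [List.cons_append, espec, hx, if_neg Bool.false_ne_true]
    rw [ih syl nuc (coda ++ [x]) r (fun y hy => hall y (by simp [hy]))]
    simp [List.append_assoc]

theorem espec_out (p : List String) : ∀ (nuc coda : List String) (syl : List (List String)),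
    espec syl nuc coda p = syl ++ espec [] nuc coda p := by
  induction p with
  | nil =>
    intro nuc coda syl
    simp only [espec]
    by_cases h : nuc ++ coda = [] <;> simp [h]
  | cons ph p ih =>
    intro nuc coda syl
    simp only [espec]
    by_cases hv : isVowel ph
    · rw [if_pos hv, if_pos hv, ih (coda ++ [ph]) [] (if nuc = [] then syl else syl ++ [nuc]),
        ih (coda ++ [ph]) [] (if nuc = [] then [] else [] ++ [nuc])]
      by_cases h0 : nuc = [] <;> simp [h0]
    · rw [if_neg hv, if_neg hv]
      exact ih nuc (coda ++ [ph]) syl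

theorem fvi_none_of_allcons (l : List String) : ∀ (k : Nat),
    (∀ x ∈ l, isVowel x = false) → firstVowelIdx l k = none := by
  induction l with
  | nil => intro k _; rfl
  | cons x xs ih =>
    intro k hall
    have hx : isVowel x = false := hall x (by simp)
    simp only [firstVowelIdx, hx, if_neg Bool.false_ne_true]
    exact ih (k + 1) (fun y hy => hall y (by simp [hy]))

theorem fvi_append (c : List String) : ∀ (k : Nat) (v : String) (q : List String),
    (∀ x ∈ c, isVowel x = false) → isVowel v = true →
    firstVowelIdx (c ++ v :: q) k = some (k + c.length) := by
  induction c with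
  | nil => intro k v q _ hv; simp [firstVowelIdx, hv]
  | cons x cs ih =>
    intro k v q hall hv
    have hx : isVowel x = false := hall x (by simp)
    simp only [List.cons_append, firstVowelIdx, hx, if_neg Bool.false_ne_true]
    rw [ih (k + 1) v q (fun y hy => hall y (by simp [hy])) hv]
    congr 1
    rw [List.length_cons]
    omega

theorem first_vowel_decomp (l : List String) (h : anyVowel l = true) :
    ∃ c v q, l = c ++ v :: q ∧ (∀ x ∈ c, isVowel x = false) ∧ isVowel v = true := by
  induction l with
  | nil => simp [anyVowel] at h
  | cons x xs ih =>
    by_cases hx : isVowel x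
    · exact ⟨[], x, xs, rfl, by simp, hx⟩
    · have hx' : isVowel x = false := by simpa using hx
      have hxs : anyVowel xs = true := by
        simpa [anyVowel, hx'] using h
      obtain ⟨c, v, q, rfl, hc, hv⟩ := ih hxs
      exact ⟨x :: c, v, q, rfl, by
        intro y hy; rcases List.mem_cons.mp hy with h | h
        · subst h; exact hx'
        · exact hc y h, hv⟩

theorem anyVowel_eq_false_iff (l : List String) :
    anyVowel l = false ↔ ∀ x ∈ l, isVowel x = false := by
  simp [anyVowel]

theorem splitLoop_none (out : List (List String)) (rest : List String)
    (h : firstVowelIdx rest 0 = none) : splitLoop out rest = out ++ [rest] := by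
  rw [splitLoop]; split <;> simp_all

theorem slice_cast (rest : List String) (j : Nat) :
    PySem.List.slice rest (some ((j : Int) + 1)) none = rest.drop (j + 1) ∧
    PySem.List.slice rest none (some ((j : Int) + 1)) = rest.take (j + 1) := by
  have h : ((j : Int) + 1) = ((j + 1 : Nat) : Int) := by push_cast; ring
  rw [h, PySem.List.slice_from_natCast, PySem.List.slice_to_natCast]
  exact ⟨rfl, rfl⟩

theorem splitLoop_some (out : List (List String)) (rest : List String) (j : Nat)
    (h : firstVowelIdx rest 0 = some j) :
    splitLoop out rest =
      if anyVowel (rest.drop (j + 1)) then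
        splitLoop (out ++ [rest.take (j + 1)]) (rest.drop (j + 1))
      else out ++ [rest] := by
  obtain ⟨h1, h2⟩ := slice_cast rest j
  rw [splitLoop]
  split
  · simp_all
  · rename_i j' hj'
    rw [h] at hj'; injection hj' with hjj; subst hjj
    rw [h1, h2]

theorem fvi_some_ne_nil {rest : List String} {j : Nat}
    (h : firstVowelIdx rest 0 = some j) : rest ≠ [] := by
  intro hrest; rw [hrest] at h; simp [firstVowelIdx] at h

theorem splitLoop_out_aux (n : Nat) : ∀ (rest : List String), rest.length ≤ n →
    ∀ (out : List (List String)), splitLoop out rest = out ++ splitLoop [] rest := by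
  induction n with
  | zero =>
    intro rest hlen out
    have hr : rest = [] := List.length_eq_zero_iff.mp (Nat.le_zero.mp hlen)
    subst hr
    rw [splitLoop_none out [] rfl, splitLoop_none [] [] rfl]
    simp
  | succ n ih =>
    intro rest hlen out
    cases h : firstVowelIdx rest 0 with
    | none => rw [splitLoop_none out rest h, splitLoop_none [] rest h]; simp
    | some j =>
      rw [splitLoop_some out rest j h, splitLoop_some [] rest j h]
      have hne := fvi_some_ne_nil h
      have hpos : 0 < rest.length := List.length_pos_iff.mpr hne
      have hd : (rest.drop (j + 1)).length ≤ n := by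
        simp [List.length_drop]; omega
      by_cases ha : anyVowel (rest.drop (j + 1))
      · rw [if_pos ha, if_pos ha, ih _ hd (out ++ [rest.take (j + 1)]),
          ih _ hd ([] ++ [rest.take (j + 1)])]
        simp
      · rw [if_neg ha, if_neg ha]; simp

theorem splitLoop_out (rest : List String) (out : List (List String)) :
    splitLoop out rest = out ++ splitLoop [] rest :=
  splitLoop_out_aux rest.length rest le_rfl out

-- main B-side bridge: after a nucleus `nuc` has been closed (ends in a vowel), the elementwise
-- machine on the remaining suffix q computes exactly what the slicing loop computes on q
theorem espec_splitLoop_aux (n : Nat) : ∀ (q : List String), q.length ≤ n →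
    ∀ (nuc a : List String) (v : String), nuc = a ++ [v] → isVowel v = true →
    espec [] nuc [] q = if anyVowel q then nuc :: splitLoop [] q else [nuc ++ q] := by
  induction n with
  | zero =>
    intro q hlen nuc a v hnuc hv
    have hq : q = [] := List.length_eq_zero_iff.mp (Nat.le_zero.mp hlen)
    subst hq hnuc
    simp [espec, anyVowel]
  | succ n ih =>
    intro q hlen nuc a v hnuc hv
    have hnucne : nuc ≠ [] := by subst hnuc; simp
    by_cases ha : anyVowel q
    · obtain ⟨c, w, q', rfl, hc, hw⟩ := first_vowel_decomp q ha
      rw [if_pos ha]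
      rw [espec_run c [] nuc [] (w :: q') hc]
      simp only [List.nil_append, espec, hw, if_pos, if_neg hnucne]
      rw [espec_out q' (c ++ [w]) [] [nuc]]
      have hq'len : q'.length ≤ n := by
        have := hlen; simp [List.length_append] at this ⊢; omega
      rw [ih q' hq'len (c ++ [w]) c w rfl hw]
      have hfvi : firstVowelIdx (c ++ w :: q') 0 = some c.length := by
        simpa using fvi_append c 0 w q' hc hw
      rw [splitLoop_some [] (c ++ w :: q') c.length hfvi]
      have hdrop : (c ++ w :: q').drop (c.length + 1) = q' := by
        have : c ++ w :: q' = (c ++ [w]) ++ q' := by simp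
        rw [this]
        have hl : (c ++ [w]).length = c.length + 1 := by simp
        rw [← hl, List.drop_left]
      have htake : (c ++ w :: q').take (c.length + 1) = c ++ [w] := by
        have : c ++ w :: q' = (c ++ [w]) ++ q' := by simp
        rw [this]
        have hl : (c ++ [w]).length = c.length + 1 := by simp
        rw [← hl, List.take_left]
      rw [hdrop, htake]
      by_cases ha' : anyVowel q'
      · rw [if_pos ha', if_pos ha', splitLoop_out q' ([] ++ [c ++ [w]])]
        simp
      · rw [if_neg ha', if_neg ha']
        simp
    · rw [if_neg ha]
      have hallc : ∀ x ∈ q, isVowel x = false :=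
        (anyVowel_eq_false_iff q).mp (by simpa using ha)
      have := espec_run q [] nuc [] [] hallc
      simp only [List.append_nil, List.nil_append] at this
      rw [this]
      simp [espec, hnucne]

theorem espec_splitLoop (q nuc a : List String) (v : String) (hnuc : nuc = a ++ [v])
    (hv : isVowel v = true) :
    espec [] nuc [] q = if anyVowel q then nuc :: splitLoop [] q else [nuc ++ q] :=
  espec_splitLoop_aux q.length q le_rfl nuc a v hnuc hv

theorem syllabify_eq_espec (phones : List String) :
    syllabify_py phones =
      if espec [] [] [] phones = [] then [phones] else espec [] [] [] phones := by
  have h := foldA phones [] [] [] (Or.inl rfl) (by simp)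
  simp only [List.append_nil] at h
  simp only [syllabify_py]
  rw [h]

-- ===== VERDICT (by name: the statement is the Claim_ definition above) =====
theorem syllabify_py_spec : Claim_equal_syllabify_py := by
  intro phones _
  unfold Spec_syllabify_py syllabify_py_alt
  rw [syllabify_eq_espec]
  cases phones with
  | nil =>
    rw [splitLoop_none [] [] rfl]
    simp [espec]
  | cons x xs =>
    by_cases ha : anyVowel (x :: xs)
    · obtain ⟨c, w, q, hdec, hc, hw⟩ := first_vowel_decomp (x :: xs) ha
      rw [hdec]
      have h1 : espec [] [] [] (c ++ w :: q) = espec [] [] c (w :: q) := by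
        simpa using espec_run c [] [] [] (w :: q) hc
      rw [h1]
      simp only [espec, hw, if_pos]
      rw [espec_splitLoop q (c ++ [w]) c w rfl hw]
      have hfvi : firstVowelIdx (c ++ w :: q) 0 = some c.length := by
        simpa using fvi_append c 0 w q hc hw
      rw [splitLoop_some [] (c ++ w :: q) c.length hfvi]
      have hdrop : (c ++ w :: q).drop (c.length + 1) = q := by
        have h2 : c ++ w :: q = (c ++ [w]) ++ q := by simp
        rw [h2]
        have hl : (c ++ [w]).length = c.length + 1 := by simp
        rw [← hl, List.drop_left]
      have htake : (c ++ w :: q).take (c.length + 1) = c ++ [w] := by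
        have h2 : c ++ w :: q = (c ++ [w]) ++ q := by simp
        rw [h2]
        have hl : (c ++ [w]).length = c.length + 1 := by simp
        rw [← hl, List.take_left]
      rw [hdrop, htake]
      by_cases ha' : anyVowel q
      · rw [if_pos ha', if_pos ha', splitLoop_out q ([] ++ [c ++ [w]])]
        simp
      · rw [if_neg ha', if_neg ha']
        simp
    · have hallc : ∀ y ∈ x :: xs, isVowel y = false :=
        (anyVowel_eq_false_iff (x :: xs)).mp (by simpa using ha)
      have h1 := espec_run (x :: xs) [] [] [] [] hallc
      simp only [List.append_nil, List.nil_append] at h1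
      rw [h1]
      rw [splitLoop_none [] (x :: xs) (fvi_none_of_allcons (x :: xs) 0 hallc)]
      simp [espec]
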